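-- pv_equiv track=rewrite | github.com/AlexBuccheri/periodicXTBworkflows | tb_lite/src/band_utils.py | labels_from_ase_bandpath
-- ===== SOURCE A (Python) =====
-- def preprocess_ase_path(path: str) -> list:
--     """Preprocess for symbols that contain numbers.
--
--     For example, ensure we get 'G1', not 'G' '1'
--     from a path like 'G1XWKGLUWLK,UX'.
--
--     :param path: ASE bandpath.path.
--     :return: new_path. ['G1', 'X', 'W', 'K', 'G', 'L', 'U', 'W', 'L', 'K', ',', 'U', 'X']
--     """
--     new_path = []
--     for symbol in path:
--         if symbol.isnumeric():
--             last_element = new_path.pop()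
--             new_path.append(last_element + symbol)
--             continue
--         new_path.append(symbol)
--     return new_path
--
-- def labels_from_ase_bandpath(path) -> list:
--     """ Convert ASE path into labels.
--
--     bandpath.path = 'G1XWKGLUWLK,UX'
--     returned as ['G1', 'X', 'W', 'K', 'G', 'L', 'U', 'W', 'L', 'K,U', 'X']
--
--     :param bandpath:
--     :return:
--     """
--     new_path = preprocess_ase_path(path)
--
--     labels = [new_path[0]]
--     for symbol in new_path[1:]:
--         # Concatenate ['K', ',', 'U'] -> ['K,U']
--         if labels[-1] == ',':
--             labels.pop()
--             labels[-1] += ',' + symbol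
--             continue
--         labels.append(symbol)
--
--     return labels
-- ===== SOURCE B (Python) =====
-- def labels_from_ase_bandpath(path) -> list:
--     """Single pass with a scalar current-label accumulator: digits extend the
--     current label; a non-digit either merges a lone ',' with the previous
--     finished label or flushes and starts a new label. No intermediate token
--     list is built."""
--     out = []
--     cur = path[0]
--     for ch in path[1:]:
--         if ch.isnumeric():
--             cur += ch
--         elif cur == ',':
--             cur = out.pop() + ',' + ch
--         else:
--             out.append(cur)
--             cur = ch
--     out.append(cur)
--     return out
-- ===== Notes on version B (the rewrite author's own statement) =====
-- stated objective: simpler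
-- what changed: Replaces A's two staged passes (build an intermediate token list attaching digits, then rescan it collapsing ',' tokens) with one pass that keeps the label under construction in a scalar accumulator and flushes/merges it directly, never materializing the token list.
import Mathlib
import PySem

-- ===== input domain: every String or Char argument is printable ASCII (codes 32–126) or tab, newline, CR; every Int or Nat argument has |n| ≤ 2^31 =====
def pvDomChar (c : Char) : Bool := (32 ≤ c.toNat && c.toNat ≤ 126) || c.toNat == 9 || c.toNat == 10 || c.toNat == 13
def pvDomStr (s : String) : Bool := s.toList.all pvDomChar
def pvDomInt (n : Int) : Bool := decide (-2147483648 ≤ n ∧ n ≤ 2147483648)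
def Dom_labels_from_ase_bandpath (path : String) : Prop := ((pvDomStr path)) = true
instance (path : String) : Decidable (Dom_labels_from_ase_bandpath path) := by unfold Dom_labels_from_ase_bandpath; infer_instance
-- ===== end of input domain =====

-- B replaces A's two staged passes (token list, then comma-collapsing rescan) by one pass
-- with a scalar current-label accumulator (objective: simpler).

-- ===== PORT A =====
-- str.isnumeric of a single char; exact on the printable-ASCII domain (digits '0'-'9')
def pvIsNumeric (c : Char) : Bool := c.isDigit

-- new_path is kept in REVERSE order (head = last element), so Python's pop/append are cons-side
def pvPreprocStep (newPath : List String) (symbol : Char) : List String :=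
  if pvIsNumeric symbol then
    match newPath with
    | lastElement :: rest => (lastElement ++ symbol.toString) :: rest
    | [] => []  -- Python: new_path.pop() raises IndexError here; excluded by Pre_
  else
    symbol.toString :: newPath

-- labels is likewise kept in reverse order (head = labels[-1])
def pvLabelStep (labels : List String) (symbol : String) : List String :=
  match labels with
  | last :: rest =>
    if last = "," then
      match rest with
      | prev :: rest' => (prev ++ "," ++ symbol) :: rest'
      | [] => []  -- Python: labels[-1] on the emptied list raises IndexError; excluded by Pre_
    else symbol :: labels
  | [] => symbol :: labels

def labels_from_ase_bandpath (path : String) : List String :=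
  let newPath := (path.toList.foldl pvPreprocStep []).reverse
  match newPath with
  | [] => []  -- Python: new_path[0] raises IndexError; excluded by Pre_
  | t :: ts => (ts.foldl pvLabelStep [t]).reverse

-- ===== PORT B =====
-- loop state (out, cur): out = finished labels in forward order, cur = label under construction
def pvStepB (st : List String × String) (ch : Char) : List String × String :=
  if ch.isDigit then (st.1, st.2 ++ ch.toString)
  else if st.2 = "," then
    match st.1.getLast? with
    | some prev => (st.1.dropLast, prev ++ "," ++ ch.toString)
    | none => (st.1, st.2)  -- Python: out.pop() raises IndexError here; excluded by Pre_
  else (st.1 ++ [st.2], ch.toString)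

def labels_from_ase_bandpath_alt (path : String) : List String :=
  match path.toList with
  | [] => []  -- Python: path[0] raises IndexError; excluded by Pre_
  | c :: cs =>
    let st := cs.foldl pvStepB ([], c.toString)
    st.1 ++ [st.2]

-- ===== PRECONDITION & SPEC =====
-- Pre_ excludes exactly the inputs on which Python A raises IndexError: the empty path,
-- a path whose first character is a digit, and a path whose first character is a comma
-- and whose second character exists and is not a digit.
def Pre_labels_from_ase_bandpath (path : String) : Prop :=
  path.toList ≠ [] ∧
  pvIsNumeric (path.toList.headD 'A') = false ∧
  (path.toList.headD 'A' = ',' →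
    path.toList.length = 1 ∨ pvIsNumeric (path.toList.getD 1 '0') = true)

instance (path : String) : Decidable (Pre_labels_from_ase_bandpath path) := by
  unfold Pre_labels_from_ase_bandpath; infer_instance

def pvWitness_labels_from_ase_bandpath : String := "G1XWK,UX"

def Spec_labels_from_ase_bandpath (path : String) (out : List String) : Prop := out = labels_from_ase_bandpath_alt path
instance (path : String) (out : List String) : Decidable (Spec_labels_from_ase_bandpath path out) := by unfold Spec_labels_from_ase_bandpath; infer_instance

-- ===== CLAIM (what is proved, stated in full; the proofs are below) =====
def Claim_equal_labels_from_ase_bandpath : Prop := ∀ (path : String), Dom_labels_from_ase_bandpath path → Pre_labels_from_ase_bandpath path → Spec_labels_from_ase_bandpath path (labels_from_ase_bandpath path)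

-- ===== LEMMAS AND PROOFS =====

-- fused single scan over the characters, labels in reverse order (proof device
-- linking A's two passes with B's (out, cur) fold)
def pvScanStep (labels : List String) (ch : Char) : List String :=
  if pvIsNumeric ch then
    match labels with
    | last :: rest => (last ++ ch.toString) :: rest
    | [] => []
  else
    match labels with
    | last :: rest =>
      if last = "," then
        match rest with
        | prev :: rest' => (prev ++ "," ++ ch.toString) :: rest'
        | [] => []
      else ch.toString :: labels
    | [] => ch.toString :: labels

-- A's labels pass, as a function of the (forward) token list
def pvLabF (T : List String) : List String :=
  match T with
  | [] => []
  | t :: ts => ts.foldl pvLabelStep [t]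

-- "extend the last label by g" (last label = head, since labels are reversed)
def pvExtend (L : List String) (g : String) : List String :=
  match L with
  | l :: ls => (l ++ g) :: ls
  | [] => []

theorem pvLabF_concat (t : String) (ts : List String) (s : String) :
    pvLabF ((t :: ts) ++ [s]) = pvLabelStep (pvLabF (t :: ts)) s := by
  simp [pvLabF, List.foldl_append]

-- extending the last token by g extends the last label by g
theorem pvLabF_extend (T : List String) (s g : String) :
    pvLabF (T ++ [s ++ g]) = pvExtend (pvLabF (T ++ [s])) g := by
  cases T with
  | nil => simp [pvLabF, pvExtend]
  | cons t ts =>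
    rw [pvLabF_concat, pvLabF_concat]
    cases h : pvLabF (t :: ts) with
    | nil => simp [pvLabelStep, pvExtend]
    | cons l ls =>
      by_cases hl : l = ","
      · cases ls with
        | nil => simp [pvLabelStep, pvExtend, hl]
        | cons prev rest => simp [pvLabelStep, pvExtend, hl, String.append_assoc]
      · simp [pvLabelStep, pvExtend, hl]

-- the fused scan equals "preprocess, then labels pass", state for state
theorem pvScan_eq_labF (cs : List Char) :
    cs.foldl pvScanStep [] = pvLabF ((cs.foldl pvPreprocStep []).reverse) := by
  induction cs using List.reverseRecOn with
  | nil => simp [pvLabF]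
  | append_singleton cs c ih =>
    rw [List.foldl_append, List.foldl_append, List.foldl_cons, List.foldl_cons,
        List.foldl_nil, List.foldl_nil, ih]
    by_cases hn : pvIsNumeric c = true
    · cases hR : cs.foldl pvPreprocStep [] with
      | nil => simp [pvScanStep, pvPreprocStep, hn, pvLabF]
      | cons last rest =>
        have : pvPreprocStep (last :: rest) c = (last ++ c.toString) :: rest := by
          simp [pvPreprocStep, hn]
        rw [this]
        have hrev : ((last ++ c.toString) :: rest).reverse
            = rest.reverse ++ [last ++ c.toString] := by simp
        rw [hrev, pvLabF_extend]
        have hrev2 : (last :: rest).reverse = rest.reverse ++ [last] := by simp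
        rw [← hrev2]
        cases hL : pvLabF ((last :: rest).reverse) with
        | nil => simp [pvScanStep, hn, pvExtend]
        | cons l ls => simp [pvScanStep, hn, pvExtend]
    · have hpp : pvPreprocStep (cs.foldl pvPreprocStep []) c
          = c.toString :: cs.foldl pvPreprocStep [] := by
        simp [pvPreprocStep, hn]
      rw [hpp]
      cases hR : cs.foldl pvPreprocStep [] with
      | nil => simp [pvScanStep, hn, pvLabF]
      | cons r rs =>
        have hrev : (c.toString :: r :: rs).reverse = (r :: rs).reverse ++ [c.toString] := by
          simp
        rw [hrev]
        cases hrr : (r :: rs).reverse with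
        | nil => simp at hrr
        | cons t ts =>
          rw [pvLabF_concat]
          cases hL : pvLabF (t :: ts) with
          | nil => simp [pvScanStep, pvLabelStep, hn]
          | cons l ls =>
            by_cases hl : l = ","
            · cases ls with
              | nil => simp [pvScanStep, pvLabelStep, hn, hl]
              | cons prev rest' => simp [pvScanStep, pvLabelStep, hn, hl]
            · simp [pvScanStep, pvLabelStep, hn, hl]

theorem pvA_eq_scan (path : String) :
    labels_from_ase_bandpath path = (path.toList.foldl pvScanStep []).reverse := by
  unfold labels_from_ase_bandpath
  rw [pvScan_eq_labF]
  cases h : (path.toList.foldl pvPreprocStep []).reverse with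
  | nil => simp [pvLabF]
  | cons t ts => simp [pvLabF]

theorem pv_ne_of_toList_ne (s t : String) (h : s.toList ≠ t.toList) : s ≠ t := by
  intro he; exact h (he ▸ rfl)

theorem pv_append_char_ne_comma (s : String) (c : Char) (hs : s ≠ "") :
    s ++ c.toString ≠ "," := by
  intro h
  have hl := congrArg (fun t => t.toList.length) h
  simp at hl
  exact hs hl

-- the fused scan equals B's fold, state for state, under the no-raise invariant
theorem pvScan_eq_B (cs : List Char) (out : List String) (cur : String)
    (hne : cur ≠ "")
    (hcomma : cur = "," → out ≠ [] ∨ cs = [] ∨ (∃ d cs', cs = d :: cs' ∧ pvIsNumeric d = true)) :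
    (cs.foldl pvScanStep ((out ++ [cur]).reverse)).reverse
      = (cs.foldl pvStepB (out, cur)).1 ++ [(cs.foldl pvStepB (out, cur)).2] := by
  induction cs generalizing out cur with
  | nil => simp
  | cons ch cs ih =>
    rw [List.foldl_cons, List.foldl_cons]
    by_cases hd : pvIsNumeric ch = true
    · have h1 : pvScanStep ((out ++ [cur]).reverse) ch = (out ++ [cur ++ ch.toString]).reverse := by
        simp [pvScanStep, hd]
      have hd'' : ch.isDigit = true := by simpa [pvIsNumeric] using hd
      have h2 : pvStepB (out, cur) ch = (out, cur ++ ch.toString) := by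
        simp [pvStepB, hd'']
      rw [h1, h2]
      exact ih out (cur ++ ch.toString)
        (by apply pv_ne_of_toList_ne; simp [hne])
        (fun hc => absurd hc (pv_append_char_ne_comma cur ch hne))
    · have hd' : ch.isDigit = false := by simpa [pvIsNumeric] using hd
      by_cases hc : cur = ","
      · have hout : out ≠ [] := by
          rcases hcomma hc with h | h | ⟨d, cs', hdd, hnum⟩
          · exact h
          · simp at h
          · cases hdd; exact absurd hnum hd
        obtain ⟨o, prev, rfl⟩ : ∃ o prev, out = o ++ [prev] := by
          rcases List.eq_nil_or_concat out with h | ⟨o, prev, h⟩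
          · exact absurd h hout
          · exact ⟨o, prev, by simpa [List.concat_eq_append] using h⟩
        have h1 : pvScanStep (((o ++ [prev]) ++ [cur]).reverse) ch
            = (o ++ [prev ++ "," ++ ch.toString]).reverse := by
          simp [pvScanStep, hd, hc]
        have h2 : pvStepB (o ++ [prev], cur) ch = (o, prev ++ "," ++ ch.toString) := by
          simp [pvStepB, hd', hc]
        rw [h1, h2]
        exact ih o (prev ++ "," ++ ch.toString)
          (pv_ne_of_toList_ne _ _ (by simp))
          (fun hcc => absurd hcc (by
            have : (prev ++ ",") ++ ch.toString ≠ "," :=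
              pv_append_char_ne_comma (prev ++ ",") ch (pv_ne_of_toList_ne _ _ (by simp))
            simpa [String.append_assoc] using this))
      · have h1 : pvScanStep ((out ++ [cur]).reverse) ch
            = ((out ++ [cur]) ++ [ch.toString]).reverse := by
          simp [pvScanStep, hd, hc]
        have h2 : pvStepB (out, cur) ch = (out ++ [cur], ch.toString) := by
          simp [pvStepB, hd', hc]
        rw [h1, h2]
        exact ih (out ++ [cur]) ch.toString
          (pv_ne_of_toList_ne _ _ (by simp))
          (fun _ => Or.inl (by simp))

theorem pv_toString_eq_comma (c : Char) (h : c.toString = ",") : c = ',' := by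
  have := congrArg String.toList h
  simpa using this

theorem pvPorts_agree (path : String) (hpre : Pre_labels_from_ase_bandpath path) :
    labels_from_ase_bandpath path = labels_from_ase_bandpath_alt path := by
  obtain ⟨hne, hhead, hcfirst⟩ := hpre
  rw [pvA_eq_scan]
  unfold labels_from_ase_bandpath_alt
  cases hpl : path.toList with
  | nil => exact absurd hpl hne
  | cons c cs =>
    rw [hpl] at hhead hcfirst
    simp only [List.headD_cons] at hhead hcfirst
    have hscan0 : pvScanStep [] c = ([] ++ [c.toString]).reverse := by
      simp [pvScanStep, hhead]
    rw [List.foldl_cons, hscan0]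
    simp only []
    exact pvScan_eq_B cs [] c.toString
      (pv_ne_of_toList_ne _ _ (by simp))
      (by
        intro hcc
        have hc : c = ',' := pv_toString_eq_comma c hcc
        rcases hcfirst hc with h1 | h2
        · right; left
          simp at h1; exact h1
        · cases cs with
          | nil => right; left; rfl
          | cons d cs' =>
            right; right
            exact ⟨d, cs', rfl, by simpa using h2⟩)

-- ===== VERDICT (by name: the statement is the Claim_ definition above) =====
theorem labels_from_ase_bandpath_spec : Claim_equal_labels_from_ase_bandpath := by
  intro path _ hpre
  unfold Spec_labels_from_ase_bandpath
  exact pvPorts_agree path hpre
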